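-- pv_equiv track=rewrite | github.com/Kanken6174/VSB | vhdl_parser.py | preprocess_vhdl
-- ===== SOURCE A (Python) =====
-- def preprocess_vhdl(t):
--     lines = t.split('\n')
--     r = []
--     for l in lines:
--         i = l.find('--')
--         if i != -1:
--             l = l[:i]
--         r.append(l)
--     return '\n'.join(r)
-- ===== SOURCE B (Python) =====
-- def preprocess_vhdl(t):
--     out = []
--     skip = False
--     n = len(t)
--     i = 0
--     while i < n:
--         c = t[i]
--         if c == '\n':
--             skip = False
--             out.append(c)
--         elif not skip:
--             if c == '-' and i + 1 < n and t[i + 1] == '-':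
--                 skip = True
--             else:
--                 out.append(c)
--         i += 1
--     return ''.join(out)
-- ===== Notes on version B (the rewrite author's own statement) =====
-- stated objective: simpler
-- what changed: Replaced A's split-into-lines / per-line comment-marker search / slice / join pipeline by a single left-to-right character scan with an in-comment flag that a newline resets, emitting kept characters as it goes.
import Mathlib
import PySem

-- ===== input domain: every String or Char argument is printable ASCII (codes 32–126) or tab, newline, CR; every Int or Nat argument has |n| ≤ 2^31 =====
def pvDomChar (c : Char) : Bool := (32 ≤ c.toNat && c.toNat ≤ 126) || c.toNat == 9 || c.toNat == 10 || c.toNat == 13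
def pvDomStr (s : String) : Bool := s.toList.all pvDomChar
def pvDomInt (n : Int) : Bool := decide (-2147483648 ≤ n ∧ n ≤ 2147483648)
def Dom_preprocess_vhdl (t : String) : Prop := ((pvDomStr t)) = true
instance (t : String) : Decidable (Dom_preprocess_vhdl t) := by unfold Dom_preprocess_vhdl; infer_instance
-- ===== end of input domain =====

-- B replaces A's split/find/slice/join pipeline by a single left-to-right scan with a
-- comment-skip flag (simpler: one pass, no line list, no index arithmetic).

-- ===== PORT A =====
-- lines = t.split('\n'); per line find('--') and cut; '\n'.join
def preprocess_vhdl (t : String) : String :=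
  let lines := PySem.Chars.splitOn t.toList ['\n']
  let r := lines.foldl (fun r l =>
      let i := PySem.Chars.find l ['-', '-']
      let l := if i ≠ -1 then PySem.Chars.slice l none (some i) else l
      r ++ [l]) ([] : List (List Char))
  String.ofList (PySem.Chars.join ['\n'] r)

-- ===== PORT B =====
-- one pass over the characters: skip = "inside a comment"; '\n' resets it;
-- cs.head? = some '-' is B's `i + 1 < n and t[i+1] == '-'` peek
def pvScan : List Char → Bool → List Char
  | [], _ => []
  | c :: cs, skip =>
    if c = '\n' then c :: pvScan cs false
    else if skip then pvScan cs true
    else if c = '-' ∧ cs.head? = some '-' then pvScan cs true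
    else c :: pvScan cs false

def preprocess_vhdl_alt (t : String) : String := String.ofList (pvScan t.toList false)

-- ===== PRECONDITION & SPEC =====
def Spec_preprocess_vhdl (t : String) (out : String) : Prop := out = preprocess_vhdl_alt t
instance (t : String) (out : String) : Decidable (Spec_preprocess_vhdl t out) := by unfold Spec_preprocess_vhdl; infer_instance

-- ===== CLAIM (what is proved, stated in full; the proofs are below) =====
def Claim_equal_preprocess_vhdl : Prop := ∀ (t : String), Dom_preprocess_vhdl t → Spec_preprocess_vhdl t (preprocess_vhdl t)

-- ===== LEMMAS AND PROOFS =====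

-- reference split of a char list at '\n' (what A's splitOn computes for this separator)
def pvSplitNl : List Char → List (List Char)
  | [] => [[]]
  | c :: cs =>
    if c = '\n' then [] :: pvSplitNl cs
    else match pvSplitNl cs with
      | x :: xs => (c :: x) :: xs
      | [] => [[c]]

-- reference per-line strip: chars up to the first "--"
def pvTake : List Char → List Char
  | [] => []
  | c :: cs => if c = '-' ∧ cs.head? = some '-' then [] else c :: pvTake cs

def pvConsHead (p : List Char) : List (List Char) → List (List Char)
  | x :: xs => (p ++ x) :: xs
  | [] => [p]

theorem pvSplitNl_ne_nil (cs : List Char) : pvSplitNl cs ≠ [] := by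
  cases cs with
  | nil => simp [pvSplitNl]
  | cons c cs =>
    simp only [pvSplitNl]
    split
    · simp
    · cases h : pvSplitNl cs <;> simp

theorem pvGo_eq (fuel : Nat) (l cur : List Char) (acc : List (List Char))
    (h : l.length < fuel) :
    PySem.Chars.splitOn.go ['\n'] fuel l cur acc
      = acc.reverse ++ pvConsHead cur.reverse (pvSplitNl l) := by
  induction fuel generalizing l cur acc with
  | zero => omega
  | succ fuel ih =>
    cases l with
    | nil => simp [PySem.Chars.splitOn.go, pvSplitNl, pvConsHead]
    | cons c rest =>
      by_cases hc : c = '\n'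
      · subst hc
        rw [show PySem.Chars.splitOn.go ['\n'] (fuel+1) ('\n' :: rest) cur acc
              = PySem.Chars.splitOn.go ['\n'] fuel rest [] (cur.reverse :: acc) by
            simp [PySem.Chars.splitOn.go, List.isPrefixOf]]
        rw [ih rest [] (cur.reverse :: acc) (by simp at h ⊢; omega)]
        obtain ⟨x, xs, hx⟩ : ∃ x xs, pvSplitNl rest = x :: xs := by
          cases hxx : pvSplitNl rest with
          | nil => exact absurd hxx (pvSplitNl_ne_nil rest)
          | cons a b => exact ⟨a, b, rfl⟩
        simp [pvSplitNl, hx, pvConsHead]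
      · rw [show PySem.Chars.splitOn.go ['\n'] (fuel+1) (c :: rest) cur acc
              = PySem.Chars.splitOn.go ['\n'] fuel rest (c :: cur) acc by
            simp [PySem.Chars.splitOn.go, List.isPrefixOf, Ne.symm hc]]
        rw [ih rest (c :: cur) acc (by simp at h ⊢; omega)]
        obtain ⟨x, xs, hx⟩ : ∃ x xs, pvSplitNl rest = x :: xs := by
          cases hxx : pvSplitNl rest with
          | nil => exact absurd hxx (pvSplitNl_ne_nil rest)
          | cons a b => exact ⟨a, b, rfl⟩
        simp [pvSplitNl, hc, hx, pvConsHead]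

theorem pvSplitOn_eq (l : List Char) : PySem.Chars.splitOn l ['\n'] = pvSplitNl l := by
  rw [show PySem.Chars.splitOn l ['\n'] = PySem.Chars.splitOn.go ['\n'] (l.length + 1) l [] [] from rfl]
  rw [pvGo_eq _ _ _ _ (by omega)]
  obtain ⟨x, xs, hx⟩ : ∃ x xs, pvSplitNl l = x :: xs := by
    cases hxx : pvSplitNl l with
    | nil => exact absurd hxx (pvSplitNl_ne_nil l)
    | cons a b => exact ⟨a, b, rfl⟩
  simp [hx, pvConsHead]

theorem pvPrefix_dd_iff (l : List Char) :
    ['-', '-'] <+: l ↔ ∃ cs, l = '-' :: cs ∧ cs.head? = some '-' := by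
  constructor
  · rintro ⟨t, rfl⟩
    exact ⟨'-' :: t, rfl, rfl⟩
  · rintro ⟨cs, rfl, hd⟩
    cases cs with
    | nil => simp at hd
    | cons d ds =>
      simp at hd
      subst hd
      exact ⟨ds, rfl⟩

theorem pvTake_of_not_infix (l : List Char) (h : ¬ ['-', '-'] <:+: l) : pvTake l = l := by
  induction l with
  | nil => rfl
  | cons c cs ih =>
    have h0 : ¬ ['-', '-'] <+: (c :: cs) := fun hp => h hp.isInfix
    have h1 : ¬ ['-', '-'] <:+: cs := fun hi => h (hi.trans (List.suffix_cons c cs).isInfix)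
    simp only [pvTake]
    rw [if_neg, ih h1]
    rintro ⟨hc, hd⟩
    exact h0 ((pvPrefix_dd_iff _).mpr ⟨cs, by rw [hc], hd⟩)

theorem pvTake_of_first (l : List Char) (n : Nat)
    (hp : ['-', '-'] <+: l.drop n) (hmin : ∀ i, i < n → ¬ ['-', '-'] <+: l.drop i) :
    pvTake l = l.take n := by
  induction l generalizing n with
  | nil => simp at hp
  | cons c cs ih =>
    cases n with
    | zero =>
      simp only [List.drop_zero] at hp
      obtain ⟨cs', hc, hd⟩ := (pvPrefix_dd_iff _).mp hp
      cases hc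
      simp [pvTake, hd]
    | succ n =>
      have h0 := hmin 0 (by omega)
      simp only [List.drop_zero] at h0
      simp only [pvTake]
      rw [if_neg, List.take_succ_cons]
      · rw [ih n (by simpa using hp) (fun i hi => by simpa using hmin (i+1) (by omega))]
      · rintro ⟨hc, hd⟩
        exact h0 ((pvPrefix_dd_iff _).mpr ⟨cs, by rw [hc], hd⟩)

-- A's per-line body equals pvTake
theorem pvLine_eq (l : List Char) :
    (if PySem.Chars.find l ['-', '-'] ≠ -1
      then PySem.Chars.slice l none (some (PySem.Chars.find l ['-', '-'])) else l) = pvTake l := by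
  by_cases h : PySem.Chars.find l ['-', '-'] = -1
  · rw [if_neg (not_not_intro h)]
    exact (pvTake_of_not_infix l ((PySem.Chars.find_eq_neg_one_iff l _).mp h)).symm
  · have h0 : 0 ≤ PySem.Chars.find l ['-', '-'] :=
      (PySem.Chars.find_nonneg_iff l _).mpr ((PySem.Chars.find_ne_neg_one_iff l _).mp h)
    obtain ⟨hp, hmin⟩ := PySem.Chars.find_spec h0
    rw [if_pos h, PySem.Chars.slice_eq_listSlice, PySem.List.slice_to _ h0]
    exact (pvTake_of_first l _ hp hmin).symm

theorem pvJoin_cons (c : Char) (a : List Char) (rest : List (List Char)) :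
    PySem.Chars.join ['\n'] ((c :: a) :: rest) = c :: PySem.Chars.join ['\n'] (a :: rest) := by
  cases rest with
  | nil => simp [PySem.Chars.join_singleton]
  | cons q r => rw [PySem.Chars.join_cons_cons, PySem.Chars.join_cons_cons]; simp

theorem pvSplitNl_head_char (cs : List Char) (x : List Char) (xs : List (List Char))
    (hx : pvSplitNl cs = x :: xs) : x.head? = some '-' ↔ cs.head? = some '-' := by
  cases cs with
  | nil =>
    simp [pvSplitNl] at hx
    obtain ⟨rfl, -⟩ := hx
    simp
  | cons c cs' =>
    by_cases hc : c = '\n'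
    · subst hc
      simp [pvSplitNl] at hx
      obtain ⟨rfl, -⟩ := hx
      simp
    · simp only [pvSplitNl, if_neg hc] at hx
      cases hxx : pvSplitNl cs' with
      | nil => exact absurd hxx (pvSplitNl_ne_nil cs')
      | cons a b =>
        rw [hxx] at hx
        injection hx with h1 h2
        subst h1
        simp

-- main simultaneous induction
theorem pvScan_eq (cs : List Char) :
    pvScan cs false = PySem.Chars.join ['\n'] ((pvSplitNl cs).map pvTake)
    ∧ pvScan cs true = PySem.Chars.join ['\n'] ([] :: ((pvSplitNl cs).map pvTake).tail) := by
  induction cs with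
  | nil => constructor <;> simp [pvScan, pvSplitNl, pvTake, PySem.Chars.join_singleton]
  | cons c cs ih =>
    obtain ⟨x, xs, hx⟩ : ∃ x xs, pvSplitNl cs = x :: xs := by
      cases hxx : pvSplitNl cs with
      | nil => exact absurd hxx (pvSplitNl_ne_nil cs)
      | cons a b => exact ⟨a, b, rfl⟩
    constructor
    · by_cases hc : c = '\n'
      · subst hc
        rw [show pvScan ('\n' :: cs) false = '\n' :: pvScan cs false by simp [pvScan]]
        rw [ih.1, hx]
        simp [pvSplitNl]
        rw [show pvTake [] = [] from rfl, hx]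
        simp only [List.map_cons]
        rw [PySem.Chars.join_cons_cons]
        simp
      · by_cases hd : c = '-' ∧ cs.head? = some '-'
        · rw [show pvScan (c :: cs) false = pvScan cs true by simp [pvScan, hd]]
          rw [ih.2, hx]
          simp only [pvSplitNl, if_neg hc, hx, List.map_cons, List.tail_cons]
          have hxh : x.head? = some '-' := (pvSplitNl_head_char cs x xs hx).mpr hd.2
          rw [show pvTake (c :: x) = [] by simp [pvTake, hd.1, hxh]]
        · rw [show pvScan (c :: cs) false = c :: pvScan cs false by simp [pvScan, hc, hd]]
          rw [ih.1, hx]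
          simp only [pvSplitNl, if_neg hc, hx, List.map_cons]
          rw [show pvTake (c :: x) = c :: pvTake x by
            simp only [pvTake]
            rw [if_neg]
            rintro ⟨h1, h2⟩
            exact hd ⟨h1, (pvSplitNl_head_char cs x xs hx).mp h2⟩]
          rw [pvJoin_cons]
    · by_cases hc : c = '\n'
      · subst hc
        rw [show pvScan ('\n' :: cs) true = '\n' :: pvScan cs false by simp [pvScan]]
        rw [ih.1, hx]
        simp [pvSplitNl]
        rw [hx]
        simp only [List.map_cons]
        rw [PySem.Chars.join_cons_cons]
        simp
      · rw [show pvScan (c :: cs) true = pvScan cs true by simp [pvScan, hc]]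
        rw [ih.2, hx]
        simp only [pvSplitNl, if_neg hc, hx, List.map_cons, List.tail_cons]

-- ===== VERDICT (by name: the statement is the Claim_ definition above) =====
theorem preprocess_vhdl_spec : Claim_equal_preprocess_vhdl := by
  intro t _
  unfold Spec_preprocess_vhdl preprocess_vhdl preprocess_vhdl_alt
  simp only []
  rw [pvSplitOn_eq, PySem.List.foldl_append_singleton_eq_map
        (fun l => if PySem.Chars.find l ['-', '-'] ≠ -1
          then PySem.Chars.slice l none (some (PySem.Chars.find l ['-', '-'])) else l)]
  simp only [pvLine_eq, List.nil_append]
  rw [(pvScan_eq t.toList).1]
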